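-- pv_equiv track=rewrite | github.com/xuychen/Leetcode | interviews/iqiyi/9.12/1.py | calcSumOfOnlyOne
-- ===== SOURCE A (Python) =====
-- def calcSumOfOnlyOne(arr):
--     s = set()
--     result = 0
--     for num in arr:
--         if num in s:
--             result -= num
--         else:
--             result += num
--
--         s.add(num)
--
--     return result
-- ===== SOURCE B (Python) =====
-- def calcSumOfOnlyOne(arr):
--     # first occurrence contributes +num, each repeat -num, so total = 2*sum(distinct) - sum(all)
--     return 2 * sum(set(arr)) - sum(arr)
-- ===== Notes on version B (the rewrite author's own statement) =====
-- stated objective: simpler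
-- what changed: Replaces the seen-set plus sequential +=/-= accumulator with the closed form 2*sum(set(arr)) - sum(arr), since first occurrences add and repeats subtract.
import Mathlib
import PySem

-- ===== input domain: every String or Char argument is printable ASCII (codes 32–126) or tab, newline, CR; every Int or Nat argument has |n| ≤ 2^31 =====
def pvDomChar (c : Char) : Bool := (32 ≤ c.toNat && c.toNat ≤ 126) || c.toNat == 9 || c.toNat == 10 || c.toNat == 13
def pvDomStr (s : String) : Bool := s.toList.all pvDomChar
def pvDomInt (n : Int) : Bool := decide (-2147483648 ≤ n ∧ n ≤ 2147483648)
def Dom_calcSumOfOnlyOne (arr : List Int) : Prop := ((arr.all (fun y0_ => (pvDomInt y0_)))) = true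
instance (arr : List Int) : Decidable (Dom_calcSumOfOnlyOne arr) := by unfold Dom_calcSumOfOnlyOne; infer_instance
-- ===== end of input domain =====

-- B replaces A's seen-set + sequential accumulator with the closed form 2*sum(set(arr)) - sum(arr) (simpler).


-- ===== PORT A =====
def calcSumOfOnlyOne (arr : List Int) : Int :=
  (arr.foldl
    (fun (st : PySem.Set Int × Int) num =>
      let result := if PySem.Set.contains st.1 num then st.2 - num else st.2 + num
      (PySem.Set.add st.1 num, result))
    (PySem.Set.empty, 0)).2

-- ===== PORT B =====
def calcSumOfOnlyOne_alt (arr : List Int) : Int :=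
  2 * (PySem.Set.ofList arr).sum - arr.sum

-- ===== PRECONDITION & SPEC =====
def Spec_calcSumOfOnlyOne (arr : List Int) (out : Int) : Prop := out = calcSumOfOnlyOne_alt arr
instance (arr : List Int) (out : Int) : Decidable (Spec_calcSumOfOnlyOne arr out) := by unfold Spec_calcSumOfOnlyOne; infer_instance

-- ===== CLAIM (what is proved, stated in full; the proofs are below) =====
def Claim_equal_calcSumOfOnlyOne : Prop := ∀ (arr : List Int), Dom_calcSumOfOnlyOne arr → Spec_calcSumOfOnlyOne arr (calcSumOfOnlyOne arr)

-- ===== LEMMAS AND PROOFS =====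

theorem sum_add (s : PySem.Set Int) (a : Int) :
    (PySem.Set.add s a).sum = if PySem.Set.contains s a then s.sum else s.sum + a := by
  simp only [PySem.Set.add, PySem.Set.contains]
  split_ifs with h <;> simp

theorem foldl_invariant (arr : List Int) (s : PySem.Set Int) (r : Int) :
    (arr.foldl
      (fun (st : PySem.Set Int × Int) num =>
        let result := if PySem.Set.contains st.1 num then st.2 - num else st.2 + num
        (PySem.Set.add st.1 num, result))
      (s, r)).2
    = r + 2 * ((arr.foldl PySem.Set.add s).sum - s.sum) - arr.sum := by
  induction arr generalizing s r with
  | nil => simp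
  | cons a tl ih =>
    simp only [List.foldl_cons, List.sum_cons]
    by_cases h : PySem.Set.contains s a = true
    · have hm : a ∈ s := by simpa [PySem.Set.contains] using h
      have hs : PySem.Set.add s a = s := by simp [PySem.Set.add, PySem.Set.contains, hm]
      rw [ih]
      simp only [h, if_true, hs]
      ring
    · rw [ih]
      simp only [h, sum_add, Bool.false_eq_true, if_false]
      ring

theorem calcSumOfOnlyOne_spec : Claim_equal_calcSumOfOnlyOne := by
  intro arr _
  show calcSumOfOnlyOne arr = calcSumOfOnlyOne_alt arr
  unfold calcSumOfOnlyOne calcSumOfOnlyOne_alt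
  rw [foldl_invariant, PySem.Set.ofList_eq_foldl]
  simp [PySem.Set.empty]
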